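-- pv_equiv track=rewrite | github.com/isidentical/onediff | onediff_diffusers_extensions/onediffx/compilers/diffusion_pipeline_compiler.py | _filter_parts
-- ===== SOURCE A (Python) =====
-- _PARTS = [
--     "text_encoder",
--     "text_encoder_2",
--     "image_encoder",
--     "unet",
--     "controlnet",
--     "fast_unet",  # for deepcache
--     "vae.decoder",
--     "vae.encoder",
-- ]
--
-- def _filter_parts(ignores=()):
--     filtered_parts = []
--     for part in _PARTS:
--         skip = False
--         for ignore in ignores:
--             if part == ignore or part.startswith(ignore + "."):
--                 skip = True
--                 break
--         if not skip:
--             filtered_parts.append(part)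
--
--     return filtered_parts
-- ===== SOURCE B (Python) =====
-- _PARTS = [
--     "text_encoder",
--     "text_encoder_2",
--     "image_encoder",
--     "unet",
--     "controlnet",
--     "fast_unet",  # for deepcache
--     "vae.decoder",
--     "vae.encoder",
-- ]
--
-- def _filter_parts(ignores=()):
--     # Keep a part iff none of its dotted prefixes is in the ignore set.
--     ignore_set = set(ignores)
--     kept = []
--     for part in _PARTS:
--         prefixes = []
--         for piece in part.split('.'):
--             prefixes.append(piece if not prefixes else prefixes[-1] + '.' + piece)
--         if ignore_set.isdisjoint(prefixes):
--             kept.append(part)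
--     return kept
-- ===== Notes on version B (the rewrite author's own statement) =====
-- stated objective: alternative
-- what changed: Instead of testing every part against every ignore with equality/startswith, B builds a set of the ignores once and keeps a part iff that set is disjoint from the part's enumerated dotted prefixes, so the per-part scan over ignores disappears behind O(1) set membership.
import Mathlib
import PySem

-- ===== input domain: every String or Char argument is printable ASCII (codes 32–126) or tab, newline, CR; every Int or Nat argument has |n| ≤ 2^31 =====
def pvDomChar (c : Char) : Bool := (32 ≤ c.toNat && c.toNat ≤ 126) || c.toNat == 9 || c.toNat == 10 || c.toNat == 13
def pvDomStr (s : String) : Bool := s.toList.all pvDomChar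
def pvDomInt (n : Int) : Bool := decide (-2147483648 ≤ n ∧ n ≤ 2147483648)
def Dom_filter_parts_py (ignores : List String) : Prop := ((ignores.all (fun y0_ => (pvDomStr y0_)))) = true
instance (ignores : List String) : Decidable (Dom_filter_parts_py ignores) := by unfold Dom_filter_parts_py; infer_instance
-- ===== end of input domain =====

-- B replaces A's per-part scan over `ignores` (equality / startswith tests) by enumerating each
-- part's dotted prefixes and testing disjointness against a set of the ignores (objective: alternative).


-- ===== PORT A =====
def pvPARTS : List String :=
  ["text_encoder", "text_encoder_2", "image_encoder", "unet",
   "controlnet", "fast_unet", "vae.decoder", "vae.encoder"]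

def filter_parts_py (ignores : List String) : List String :=
  pvPARTS.foldl (fun filtered_parts part =>
    let skip := ignores.any (fun ignore =>
      part == ignore || PySem.Str.startswith part (String.ofList (ignore.toList ++ ['.'])))
    if skip then filtered_parts else filtered_parts ++ [part]) []

-- ===== PORT B =====
-- dotted prefixes of a part: fold over part.split('.'), each new prefix extends the previous one
def pvPrefixes (part : String) : List String :=
  (PySem.Chars.splitOn part.toList ['.']).foldl
    (fun (prefs : List String) piece =>
      prefs ++ [match prefs.getLast? with
                | none => String.ofList piece
                | some prev => String.ofList (prev.toList ++ '.' :: piece)]) []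

def filter_parts_py_alt (ignores : List String) : List String :=
  let ignoreSet : PySem.Set String := PySem.Set.ofList ignores
  pvPARTS.foldl (fun kept part =>
    if PySem.Set.isdisjoint ignoreSet (pvPrefixes part) then kept ++ [part] else kept) []

-- ===== PRECONDITION & SPEC =====
def Spec_filter_parts_py (ignores : List String) (out : List String) : Prop := out = filter_parts_py_alt ignores
instance (ignores : List String) (out : List String) : Decidable (Spec_filter_parts_py ignores out) := by unfold Spec_filter_parts_py; infer_instance

-- ===== CLAIM (what is proved, stated in full; the proofs are below) =====
def Claim_equal_filter_parts_py : Prop := ∀ (ignores : List String), Dom_filter_parts_py ignores → Spec_filter_parts_py ignores (filter_parts_py ignores)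

-- ===== LEMMAS AND PROOFS =====

-- s ++ ['.'] is a prefix of p iff s is a prefix of p with a '.' right after it
theorem pv_append_dot_prefix (s p : List Char) :
    s ++ ['.'] <+: p ↔ s <+: p ∧ p[s.length]? = some '.' := by
  constructor
  · rintro ⟨t, rfl⟩
    refine ⟨⟨'.' :: t, by simp⟩, ?_⟩
    rw [List.append_assoc]
    simp
  · rintro ⟨⟨r, rfl⟩, h2⟩
    cases r with
    | nil => simp at h2
    | cons c t =>
      simp at h2
      exact ⟨t, by simp [h2]⟩

-- a part without dots is never matched by startswith(ignore + ".")
theorem pv_no_dot_prefix (s p : List Char) (hp : '.' ∉ p) : ¬ (s ++ ['.'] <+: p) :=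
  fun h => hp (h.sublist.mem (by simp))

-- skip condition for a dot-free part is plain equality
theorem pv_cond_nodot (p : String) (hp : '.' ∉ p.toList) (s : String) :
    (p == s || PySem.Str.startswith p (String.ofList (s.toList ++ ['.']))) = (s == p) := by
  have hsw : PySem.Str.startswith p (String.ofList (s.toList ++ ['.'])) = false := by
    rw [Bool.eq_false_iff]
    intro h
    simp only [PySem.Str.startswith_eq, String.toList_ofList] at h
    exact pv_no_dot_prefix _ _ hp ((PySem.Chars.startswith_iff _ _).mp h)
  rw [hsw, Bool.or_false, Bool.eq_iff_iff]
  simp only [beq_iff_eq]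
  exact eq_comm

-- for "vae.decoder" / "vae.encoder": the only dotted-prefix match is s = "vae"
theorem pv_dotpref_vd (s : List Char) :
    (s ++ ['.'] <+: "vae.decoder".toList) ↔ s = "vae".toList := by
  rw [pv_append_dot_prefix]
  constructor
  · rintro ⟨hp, hg⟩
    have hlt : s.length < ("vae.decoder".toList).length := (List.getElem?_eq_some_iff.mp hg).1
    have hlen : s.length = 3 := by
      have key : ∀ i, i < 11 → ("vae.decoder".toList)[i]? = some '.' → i = 3 := by decide
      exact key s.length (by simpa using hlt) hg
    rw [List.prefix_iff_eq_take] at hp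
    rw [hp, hlen]
    decide
  · rintro rfl
    exact ⟨by decide, by decide⟩

theorem pv_dotpref_ve (s : List Char) :
    (s ++ ['.'] <+: "vae.encoder".toList) ↔ s = "vae".toList := by
  rw [pv_append_dot_prefix]
  constructor
  · rintro ⟨hp, hg⟩
    have hlt : s.length < ("vae.encoder".toList).length := (List.getElem?_eq_some_iff.mp hg).1
    have hlen : s.length = 3 := by
      have key : ∀ i, i < 11 → ("vae.encoder".toList)[i]? = some '.' → i = 3 := by decide
      exact key s.length (by simpa using hlt) hg
    rw [List.prefix_iff_eq_take] at hp
    rw [hp, hlen]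
    decide
  · rintro rfl
    exact ⟨by decide, by decide⟩

theorem pv_cond_vd (s : String) :
    ("vae.decoder" == s || PySem.Str.startswith "vae.decoder" (String.ofList (s.toList ++ ['.'])))
      = true ↔ (s = "vae" ∨ s = "vae.decoder") := by
  simp only [Bool.or_eq_true, beq_iff_eq, PySem.Str.startswith_eq, String.toList_ofList,
    PySem.Chars.startswith_iff, pv_dotpref_vd, ← String.toList_inj]
  tauto

theorem pv_cond_ve (s : String) :
    ("vae.encoder" == s || PySem.Str.startswith "vae.encoder" (String.ofList (s.toList ++ ['.'])))
      = true ↔ (s = "vae" ∨ s = "vae.encoder") := by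
  simp only [Bool.or_eq_true, beq_iff_eq, PySem.Str.startswith_eq, String.toList_ofList,
    PySem.Chars.startswith_iff, pv_dotpref_ve, ← String.toList_inj]
  tauto

-- A's inner any-loop equals B's negated set-disjointness test, given a pointwise
-- characterization of the skip condition by the finite list of matching ignores
theorem pv_any_eq_not_disjoint (ignores L : List String) (cond : String → Bool)
    (h : ∀ s, cond s = true ↔ s ∈ L) :
    ignores.any cond = !(PySem.Set.isdisjoint (PySem.Set.ofList ignores) L) := by
  rw [Bool.eq_iff_iff]
  simp only [List.any_eq_true, h, Bool.not_eq_true']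
  constructor
  · rintro ⟨x, hx, hxL⟩
    rw [Bool.eq_false_iff]
    intro hd
    exact ((PySem.Set.isdisjoint_iff _ _).mp hd x ((PySem.Set.mem_ofList _ _).mpr hx)) hxL
  · intro hd
    by_contra hne
    push Not at hne
    rw [Bool.eq_false_iff] at hd
    apply hd
    rw [PySem.Set.isdisjoint_iff]
    intro x hx hxL
    exact hne x ((PySem.Set.mem_ofList _ _).mp hx) hxL

-- evaluation helper: rewrite a computed prefix list by its literal value
theorem pv_prefixes_eval {p : String} {L : List String} (h : pvPrefixes p = L) (s : String) :
    (s ∈ pvPrefixes p) = (s ∈ L) := by rw [h]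

theorem pv_skip_text_encoder (ignores : List String) :
    (ignores.any (fun ignore =>
        ("text_encoder" == ignore || PySem.Str.startswith "text_encoder" (String.ofList (ignore.toList ++ ['.'])))))
      = !(PySem.Set.isdisjoint (PySem.Set.ofList ignores) (pvPrefixes "text_encoder")) := by
  apply pv_any_eq_not_disjoint
  intro s
  rw [pv_cond_nodot _ (by decide) s, Bool.eq_iff_iff,
    pv_prefixes_eval (show pvPrefixes "text_encoder" = ["text_encoder"] by decide)]
  simp [beq_iff_eq]

theorem pv_skip_text_encoder_2 (ignores : List String) :
    (ignores.any (fun ignore =>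
        ("text_encoder_2" == ignore || PySem.Str.startswith "text_encoder_2" (String.ofList (ignore.toList ++ ['.'])))))
      = !(PySem.Set.isdisjoint (PySem.Set.ofList ignores) (pvPrefixes "text_encoder_2")) := by
  apply pv_any_eq_not_disjoint
  intro s
  rw [pv_cond_nodot _ (by decide) s, Bool.eq_iff_iff,
    pv_prefixes_eval (show pvPrefixes "text_encoder_2" = ["text_encoder_2"] by decide)]
  simp [beq_iff_eq]

theorem pv_skip_image_encoder (ignores : List String) :
    (ignores.any (fun ignore =>
        ("image_encoder" == ignore || PySem.Str.startswith "image_encoder" (String.ofList (ignore.toList ++ ['.'])))))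
      = !(PySem.Set.isdisjoint (PySem.Set.ofList ignores) (pvPrefixes "image_encoder")) := by
  apply pv_any_eq_not_disjoint
  intro s
  rw [pv_cond_nodot _ (by decide) s, Bool.eq_iff_iff,
    pv_prefixes_eval (show pvPrefixes "image_encoder" = ["image_encoder"] by decide)]
  simp [beq_iff_eq]

theorem pv_skip_unet (ignores : List String) :
    (ignores.any (fun ignore =>
        ("unet" == ignore || PySem.Str.startswith "unet" (String.ofList (ignore.toList ++ ['.'])))))
      = !(PySem.Set.isdisjoint (PySem.Set.ofList ignores) (pvPrefixes "unet")) := by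
  apply pv_any_eq_not_disjoint
  intro s
  rw [pv_cond_nodot _ (by decide) s, Bool.eq_iff_iff,
    pv_prefixes_eval (show pvPrefixes "unet" = ["unet"] by decide)]
  simp [beq_iff_eq]

theorem pv_skip_controlnet (ignores : List String) :
    (ignores.any (fun ignore =>
        ("controlnet" == ignore || PySem.Str.startswith "controlnet" (String.ofList (ignore.toList ++ ['.'])))))
      = !(PySem.Set.isdisjoint (PySem.Set.ofList ignores) (pvPrefixes "controlnet")) := by
  apply pv_any_eq_not_disjoint
  intro s
  rw [pv_cond_nodot _ (by decide) s, Bool.eq_iff_iff,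
    pv_prefixes_eval (show pvPrefixes "controlnet" = ["controlnet"] by decide)]
  simp [beq_iff_eq]

theorem pv_skip_fast_unet (ignores : List String) :
    (ignores.any (fun ignore =>
        ("fast_unet" == ignore || PySem.Str.startswith "fast_unet" (String.ofList (ignore.toList ++ ['.'])))))
      = !(PySem.Set.isdisjoint (PySem.Set.ofList ignores) (pvPrefixes "fast_unet")) := by
  apply pv_any_eq_not_disjoint
  intro s
  rw [pv_cond_nodot _ (by decide) s, Bool.eq_iff_iff,
    pv_prefixes_eval (show pvPrefixes "fast_unet" = ["fast_unet"] by decide)]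
  simp [beq_iff_eq]

theorem pv_skip_vae_decoder (ignores : List String) :
    (ignores.any (fun ignore =>
        ("vae.decoder" == ignore || PySem.Str.startswith "vae.decoder" (String.ofList (ignore.toList ++ ['.'])))))
      = !(PySem.Set.isdisjoint (PySem.Set.ofList ignores) (pvPrefixes "vae.decoder")) := by
  apply pv_any_eq_not_disjoint
  intro s
  rw [Bool.eq_iff_iff, pv_cond_vd s, pv_prefixes_eval (show pvPrefixes "vae.decoder" = ["vae", "vae.decoder"] by decide)]
  simp

theorem pv_skip_vae_encoder (ignores : List String) :
    (ignores.any (fun ignore =>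
        ("vae.encoder" == ignore || PySem.Str.startswith "vae.encoder" (String.ofList (ignore.toList ++ ['.'])))))
      = !(PySem.Set.isdisjoint (PySem.Set.ofList ignores) (pvPrefixes "vae.encoder")) := by
  apply pv_any_eq_not_disjoint
  intro s
  rw [Bool.eq_iff_iff, pv_cond_ve s, pv_prefixes_eval (show pvPrefixes "vae.encoder" = ["vae", "vae.encoder"] by decide)]
  simp

-- if-swap between A's skip test and B's keep test
theorem pv_ite_not {α : Type} (b : Bool) (x y : α) :
    (if (!b) = true then x else y) = (if b = true then y else x) := by
  cases b <;> simp

-- ===== VERDICT (by name: the statement is the Claim_ definition above) =====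
theorem filter_parts_py_spec : Claim_equal_filter_parts_py := by
  intro ignores _
  unfold Spec_filter_parts_py filter_parts_py filter_parts_py_alt pvPARTS
  simp only [List.foldl_cons, List.foldl_nil,
    pv_skip_text_encoder, pv_skip_text_encoder_2, pv_skip_image_encoder, pv_skip_unet,
    pv_skip_controlnet, pv_skip_fast_unet, pv_skip_vae_decoder, pv_skip_vae_encoder,
    pv_ite_not]
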